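-- pv_equiv track=rewrite | github.com/calebyhan/rescored | backend/pipeline.py | _remove_octave_duplicates
-- ===== SOURCE A (Python) =====
-- def _remove_octave_duplicates(notes: list) -> list:
--     """
--     Remove notes that are exact octaves (12 semitones apart).
--
--     Preserves notes of different pitch classes. For example:
--     - C4 (60) + C6 (84) → keep only C6 (same pitch class, octave duplicate)
--     - D2 (38) + A5 (81) → keep both (different pitch classes, not duplicates)
--
--     Args:
--         notes: List of (note_num, start, end, vel) tuples
--
--     Returns:
--         Deduplicated list with only highest octave of each pitch class
--     """
--     from collections import defaultdict
--
--     # Group by pitch class (C=0, C#=1, ..., B=11)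
--     pitch_classes = defaultdict(list)
--
--     for note_num, start, end, vel in notes:
--         pitch_class = note_num % 12
--         pitch_classes[pitch_class].append((note_num, start, end, vel))
--
--     result = []
--     for pitch_class, note_group in pitch_classes.items():
--         if len(note_group) == 1:
--             # Not a duplicate - keep it
--             result.append(note_group[0])
--         else:
--             # Multiple notes of same pitch class (C4, C5, C6)
--             # Keep the highest octave
--             highest = max(note_group, key=lambda x: x[0])
--             result.append(highest)
--
--     return result
-- ===== SOURCE B (Python) =====
-- def _remove_octave_duplicates(notes: list) -> list:
--     # Single pass: keep a running winner per pitch class (strict > keeps the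
--     # first note on ties, exactly like max()).
--     best = {}
--     for note in notes:
--         pc = note[0] % 12
--         cur = best.get(pc)
--         if cur is None or note[0] > cur[0]:
--             best[pc] = note
--     return list(best.values())
-- ===== Notes on version B (the rewrite author's own statement) =====
-- stated objective: simpler
-- what changed: Replaces the two-phase defaultdict-of-lists grouping plus per-group max() reduction with a single pass that keeps one running best note per pitch class and returns the dict's values.
import Mathlib
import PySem

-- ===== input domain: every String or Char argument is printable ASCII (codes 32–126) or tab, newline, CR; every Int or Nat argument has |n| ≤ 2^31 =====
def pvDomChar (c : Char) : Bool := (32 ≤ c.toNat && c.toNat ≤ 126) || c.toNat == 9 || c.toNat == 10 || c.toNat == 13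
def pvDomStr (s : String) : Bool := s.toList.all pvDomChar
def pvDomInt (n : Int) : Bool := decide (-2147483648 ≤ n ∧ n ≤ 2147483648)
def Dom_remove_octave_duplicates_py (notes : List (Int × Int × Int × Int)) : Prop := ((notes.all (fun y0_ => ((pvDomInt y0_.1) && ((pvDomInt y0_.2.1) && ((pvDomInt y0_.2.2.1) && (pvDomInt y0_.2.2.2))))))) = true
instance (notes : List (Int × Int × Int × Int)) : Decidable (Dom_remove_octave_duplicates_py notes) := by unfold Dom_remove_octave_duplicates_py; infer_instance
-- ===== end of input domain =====

-- B replaces A's group-into-lists-then-max() two-phase pass by a single pass keeping one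
-- running best note per pitch class (simpler; same O(n) cost).


-- ===== PORT A =====
-- pitch_classes = defaultdict(list); for … : pitch_classes[note_num % 12].append(note)
-- then for each group: its single element, else max(group, key = x[0]) (first maximal).
def remove_octave_duplicates_py (notes : List (Int × Int × Int × Int)) : List (Int × Int × Int × Int) :=
  let pitch_classes : PySem.Dict Int (List (Int × Int × Int × Int)) :=
    notes.foldl (fun d note => d.modify (PySem.Int.mod note.1 12) [] (fun g => g ++ [note]))
      PySem.Dict.empty
  pitch_classes.items.foldl
    (fun result p =>
      if p.2.length = 1 then
        result ++ [(PySem.List.pyGet? p.2 0).getD (0, 0, 0, 0)]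
      else
        result ++ [(PySem.List.max? p.2 (fun x => x.1)).getD (0, 0, 0, 0)])
    []

-- ===== PORT B =====
-- best = {}; one pass; best[pc] = note when pc absent or note[0] > best[pc][0]; return values.
def remove_octave_duplicates_py_alt (notes : List (Int × Int × Int × Int)) : List (Int × Int × Int × Int) :=
  (notes.foldl
    (fun best note =>
      let pc := PySem.Int.mod note.1 12
      match best.get? pc with
      | none => best.insert pc note
      | some cur => if note.1 > cur.1 then best.insert pc note else best)
    (PySem.Dict.empty : PySem.Dict Int (Int × Int × Int × Int))).values

-- ===== PRECONDITION & SPEC =====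
def Spec_remove_octave_duplicates_py (notes : List (Int × Int × Int × Int)) (out : List (Int × Int × Int × Int)) : Prop := out = remove_octave_duplicates_py_alt notes
instance (notes : List (Int × Int × Int × Int)) (out : List (Int × Int × Int × Int)) : Decidable (Spec_remove_octave_duplicates_py notes out) := by unfold Spec_remove_octave_duplicates_py; infer_instance

-- ===== CLAIM (what is proved, stated in full; the proofs are below) =====
def Claim_equal_remove_octave_duplicates_py : Prop := ∀ (notes : List (Int × Int × Int × Int)), Dom_remove_octave_duplicates_py notes → Spec_remove_octave_duplicates_py notes (remove_octave_duplicates_py notes)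

-- ===== LEMMAS AND PROOFS =====

-- the first maximal element of a group, with a dummy default (groups are never empty)
def pvBest (g : List (Int × Int × Int × Int)) : Int × Int × Int × Int :=
  (PySem.List.max? g (fun x => x.1)).getD (0, 0, 0, 0)

def pvMap (l : List (Int × List (Int × Int × Int × Int))) : List (Int × (Int × Int × Int × Int)) :=
  l.map (fun p => (p.1, pvBest p.2))

lemma pvBest_append (g : List (Int × Int × Int × Int)) (n : Int × Int × Int × Int)
    (hg : g ≠ []) :
    pvBest (g ++ [n]) = if (pvBest g).1 < n.1 then n else pvBest g := by
  obtain ⟨m, hm⟩ : ∃ m, PySem.List.max? g (fun x => x.1) = some m := by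
    cases h : PySem.List.max? g (fun x => x.1) with
    | none => exact absurd ((PySem.List.max?_eq_none_iff g _).mp h) hg
    | some m => exact ⟨m, rfl⟩
  simp only [pvBest, PySem.List.max?] at hm ⊢
  rw [List.foldl_append, hm]
  simp only [List.foldl_cons, List.foldl_nil]
  by_cases hmn : m.1 < n.1
  · simp [hmn]
  · simp [hmn]

lemma pvFind_map (l : List (Int × List (Int × Int × Int × Int))) (pc : Int) :
    List.find? (fun p => p.1 == pc) (pvMap l)
      = (List.find? (fun p => p.1 == pc) l).map (fun p => (p.1, pvBest p.2)) := by
  unfold pvMap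
  rw [List.find?_map]
  rfl

def pvStepA (d : PySem.Dict Int (List (Int × Int × Int × Int))) (note : Int × Int × Int × Int) :
    PySem.Dict Int (List (Int × Int × Int × Int)) :=
  d.modify (PySem.Int.mod note.1 12) [] (fun g => g ++ [note])

def pvStepB (best : PySem.Dict Int (Int × Int × Int × Int)) (note : Int × Int × Int × Int) :
    PySem.Dict Int (Int × Int × Int × Int) :=
  let pc := PySem.Int.mod note.1 12
  match best.get? pc with
  | none => best.insert pc note
  | some cur => if note.1 > cur.1 then best.insert pc note else best

lemma pvGet_rel (dA : PySem.Dict Int (List (Int × Int × Int × Int)))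
    (dB : PySem.Dict Int (Int × Int × Int × Int)) (pc : Int)
    (hrel : dB.items = pvMap dA.items) :
    dB.get? pc = (dA.get? pc).map pvBest := by
  simp only [PySem.Dict.get?, hrel, pvFind_map, Option.map_map]
  rfl

lemma pvBest_single (n : Int × Int × Int × Int) : pvBest [n] = n := by
  simp [pvBest, PySem.List.max?]

lemma pvStep_rel (dA : PySem.Dict Int (List (Int × Int × Int × Int)))
    (dB : PySem.Dict Int (Int × Int × Int × Int)) (n : Int × Int × Int × Int)
    (hne : ∀ p ∈ dA.items, p.2 ≠ []) (hnd : dA.keys.Nodup)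
    (hrel : dB.items = pvMap dA.items) :
    (∀ p ∈ (pvStepA dA n).items, p.2 ≠ []) ∧ (pvStepA dA n).keys.Nodup ∧
      (pvStepB dB n).items = pvMap (pvStepA dA n).items := by
  have hget := pvGet_rel dA dB (PySem.Int.mod n.1 12) hrel
  have hA : pvStepA dA n
      = dA.insert (PySem.Int.mod n.1 12) (dA.getD (PySem.Int.mod n.1 12) [] ++ [n]) := rfl
  have hndA' : (pvStepA dA n).keys.Nodup := by
    rw [hA]; exact PySem.Dict.nodup_keys_insert _ _ _ hnd
  by_cases h : dA.contains (PySem.Int.mod n.1 12) = true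
  · obtain ⟨g, hg⟩ : ∃ g, dA.get? (PySem.Int.mod n.1 12) = some g := by
      rw [PySem.Dict.contains_eq_isSome_get?] at h
      cases hx : dA.get? (PySem.Int.mod n.1 12) with
      | none => rw [hx] at h; simp at h
      | some g => exact ⟨g, rfl⟩
    have hgD : dA.getD (PySem.Int.mod n.1 12) [] = g :=
      PySem.Dict.getD_of_get?_eq_some _ _ hg
    have hmem : (PySem.Int.mod n.1 12, g) ∈ dA.items :=
      PySem.Dict.mem_items_of_get?_eq_some _ hg
    have hgne : g ≠ [] := hne _ hmem
    have hitA : (pvStepA dA n).items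
        = dA.items.map (fun p => if p.1 == PySem.Int.mod n.1 12
            then (PySem.Int.mod n.1 12, g ++ [n]) else p) := by
      rw [hA, hgD]; exact PySem.Dict.items_insert_of_contains _ _ h
    have hbest := pvBest_append g n hgne
    have hB : pvStepB dB n
        = if (pvBest g).1 < n.1 then dB.insert (PySem.Int.mod n.1 12) n else dB := by
      simp only [pvStepB, hget, hg, Option.map_some]
    refine ⟨?_, hndA', ?_⟩
    · intro p hp
      rw [hitA] at hp
      obtain ⟨q, hq, hqe⟩ := List.mem_map.mp hp
      by_cases hq1 : (q.1 == PySem.Int.mod n.1 12) = true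
      · rw [if_pos hq1] at hqe; rw [← hqe]; simp
      · rw [if_neg hq1] at hqe; rw [← hqe]; exact hne q hq
    · rw [hitA]
      by_cases hlt : (pvBest g).1 < n.1
      · have hcB : dB.contains (PySem.Int.mod n.1 12) = true := by
          rw [PySem.Dict.contains_eq_isSome_get?, hget, hg]; rfl
        rw [hB, if_pos hlt, PySem.Dict.items_insert_of_contains _ _ hcB, hrel]
        unfold pvMap
        rw [List.map_map, List.map_map]
        apply List.map_congr_left
        intro q hq
        by_cases hq1 : (q.1 == PySem.Int.mod n.1 12) = true
        · simp only [Function.comp_apply, if_pos hq1, hbest, if_pos hlt]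
        · simp only [Function.comp_apply, if_neg hq1]
      · rw [hB, if_neg hlt, hrel]
        unfold pvMap
        rw [List.map_map]
        apply List.map_congr_left
        intro q hq
        by_cases hq1 : (q.1 == PySem.Int.mod n.1 12) = true
        · have hq1' : q.1 = PySem.Int.mod n.1 12 := by exact_mod_cast eq_of_beq hq1
          have hqg : dA.get? q.1 = some q.2 := by
            have := PySem.Dict.get?_of_mem_items dA (k := q.1) (v := q.2) (by simpa using hq) hnd
            simpa using this
          have hq2 : q.2 = g := by
            rw [hq1', hg] at hqg
            exact (Option.some_inj.mp hqg).symm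
          simp only [Function.comp_apply, if_pos hq1, hbest, if_neg hlt, hq2]
          rw [hq1']
        · simp only [Function.comp_apply, if_neg hq1]
  · have h' : dA.contains (PySem.Int.mod n.1 12) = false := by simpa using h
    have hgD : dA.getD (PySem.Int.mod n.1 12) [] = [] :=
      PySem.Dict.getD_of_not_contains _ _ h'
    have hgnone : dA.get? (PySem.Int.mod n.1 12) = none :=
      (PySem.Dict.get?_eq_none_iff_contains _ _).mpr h'
    have hcB : dB.contains (PySem.Int.mod n.1 12) = false := by
      rw [PySem.Dict.contains_eq_isSome_get?, hget, hgnone]; rfl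
    have hitA : (pvStepA dA n).items = dA.items ++ [(PySem.Int.mod n.1 12, [] ++ [n])] := by
      rw [hA, hgD]; exact PySem.Dict.items_insert_of_not_contains _ _ h'
    have hB : pvStepB dB n = dB.insert (PySem.Int.mod n.1 12) n := by
      simp only [pvStepB, hget, hgnone, Option.map_none]
    refine ⟨?_, hndA', ?_⟩
    · intro p hp
      rw [hitA] at hp
      rcases List.mem_append.mp hp with hl | hr
      · exact hne p hl
      · simp at hr; rw [hr]; simp
    · rw [hB, PySem.Dict.items_insert_of_not_contains _ _ hcB, hrel, hitA]
      unfold pvMap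
      rw [List.map_append]
      simp [pvBest_single]
lemma pvLoop_rel (notes : List (Int × Int × Int × Int))
    (dA : PySem.Dict Int (List (Int × Int × Int × Int)))
    (dB : PySem.Dict Int (Int × Int × Int × Int))
    (hne : ∀ p ∈ dA.items, p.2 ≠ []) (hnd : dA.keys.Nodup)
    (hrel : dB.items = pvMap dA.items) :
    (∀ p ∈ (notes.foldl pvStepA dA).items, p.2 ≠ []) ∧
      (notes.foldl pvStepB dB).items = pvMap (notes.foldl pvStepA dA).items := by
  induction notes generalizing dA dB with
  | nil => exact ⟨hne, hrel⟩
  | cons n t ih =>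
    obtain ⟨h1, h2, h3⟩ := pvStep_rel dA dB n hne hnd hrel
    simpa [List.foldl_cons] using ih (pvStepA dA n) (pvStepB dB n) h1 h2 h3

def pvResFold (l : List (Int × List (Int × Int × Int × Int))) :
    List (Int × Int × Int × Int) :=
  l.foldl
    (fun result p =>
      if p.2.length = 1 then
        result ++ [(PySem.List.pyGet? p.2 0).getD (0, 0, 0, 0)]
      else
        result ++ [(PySem.List.max? p.2 (fun x => x.1)).getD (0, 0, 0, 0)])
    []

lemma pvPortA_eq (notes : List (Int × Int × Int × Int)) :
    remove_octave_duplicates_py notes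
      = pvResFold ((notes.foldl pvStepA PySem.Dict.empty).items) := rfl

lemma pvPortB_eq (notes : List (Int × Int × Int × Int)) :
    remove_octave_duplicates_py_alt notes
      = ((notes.foldl pvStepB PySem.Dict.empty).values) := rfl

lemma pvResFold_acc (l : List (Int × List (Int × Int × Int × Int))) :
    ∀ acc, l.foldl
      (fun result p =>
        if p.2.length = 1 then
          result ++ [(PySem.List.pyGet? p.2 0).getD (0, 0, 0, 0)]
        else
          result ++ [(PySem.List.max? p.2 (fun x => x.1)).getD (0, 0, 0, 0)])
      acc
      = acc ++ l.map (fun p =>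
          if p.2.length = 1 then (PySem.List.pyGet? p.2 0).getD (0, 0, 0, 0)
          else pvBest p.2) := by
  induction l with
  | nil => simp
  | cons p t ih =>
    intro acc
    simp only [List.foldl_cons, List.map_cons]
    by_cases h : p.2.length = 1
    · rw [if_pos h, if_pos h, ih]; simp
    · rw [if_neg h, if_neg h, ih]; simp [pvBest]

lemma pvResFold_eq (l : List (Int × List (Int × Int × Int × Int))) :
    pvResFold l = (pvMap l).map (fun p => p.2) := by
  unfold pvResFold
  rw [pvResFold_acc l []]
  unfold pvMap
  rw [List.map_map]
  simp only [List.nil_append]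
  apply List.map_congr_left
  intro q hq
  by_cases h : q.2.length = 1
  · obtain ⟨x, hx⟩ : ∃ x, q.2 = [x] := List.length_eq_one_iff.mp h
    simp [hx, PySem.List.pyGet?, PySem.List.pyIdx?, pvBest_single]
  · simp [h]

-- ===== VERDICT (by name: the statement is the Claim_ definition above) =====
theorem remove_octave_duplicates_py_spec : Claim_equal_remove_octave_duplicates_py := by
  intro notes _
  show remove_octave_duplicates_py notes = remove_octave_duplicates_py_alt notes
  obtain ⟨-, hrel⟩ := pvLoop_rel notes PySem.Dict.empty PySem.Dict.empty
    (by intro p hp; simp [PySem.Dict.empty] at hp) (by simp [PySem.Dict.empty, PySem.Dict.keys])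
    (by simp [PySem.Dict.empty, pvMap])
  rw [pvPortA_eq, pvPortB_eq, PySem.Dict.values, hrel, pvResFold_eq]
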